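-- pv_equiv track=rewrite | github.com/simonwangao/Pickle_Gomoku_Agent | board.py | GetPval
-- ===== SOURCE A (Python) =====
-- win = 7             # 连五
--
-- flex4 = 6           # 活四
--
-- block4 = 5          # 冲四
--
-- flex3 = 4           # 活三
--
-- def GetPval(a, b, c, d):
--     # 根据四个方向的棋形打分
--     type_ = [ 0 for _ in range(8) ]
--     type_[a] += 1
--     type_[b] += 1
--     type_[c] += 1
--     type_[d] += 1
--
--     if type_[win] > 0:
--         return 5000
--     if type_[flex4] > 0 or type_[block4] > 1:
--         return 1200
--     if type_[block4] > 0 and type_[flex3] > 0: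
--         return 1000
--     if type_[flex3] > 1:
--         return 200
--
--     val = [0, 2, 5, 5, 12, 12]
--     score = 0
--     for i in range(1, block4+1):
--         score = score + val[i] * type_[i]
--
--     return score
-- ===== SOURCE B (Python) =====
-- RANK = (0, 1, 2, 2, 3, 4, 5, 6)   # pattern rank of each code (codes 2 and 3 score alike)
-- RANK_WEIGHT = (0, 2, 5, 12, 12)   # weight of the low ranks; ranks 5-6 always force a return
--
-- def GetPval(a, b, c, d):
--     # Rank the four directional patterns, then judge the two strongest.
--     ranks = sorted((RANK[x] for x in (a, b, c, d)), reverse=True)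
--     hi, second = ranks[:2]
--     if hi == 6:                                 # five in a row
--         return 5000
--     if hi == 5 or (hi == 4 and second == 4):    # flex four, or two block fours
--         return 1200
--     if hi == 4 and second == 3:                 # block four plus flex three
--         return 1000
--     if hi == 3 and second == 3:                 # two flex threes
--         return 200
--     return sum(RANK_WEIGHT[r] for r in ranks)
-- ===== Notes on version B (the rewrite author's own statement) =====
-- stated objective: alternative
-- what changed: Replaces the 8-bucket histogram cascade by mapping each code to a pattern rank (collapsing the two equally-weighted shapes), sorting the ranks and deciding from the two strongest, with a rank-weight sum as the base case.
import Mathlib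
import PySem

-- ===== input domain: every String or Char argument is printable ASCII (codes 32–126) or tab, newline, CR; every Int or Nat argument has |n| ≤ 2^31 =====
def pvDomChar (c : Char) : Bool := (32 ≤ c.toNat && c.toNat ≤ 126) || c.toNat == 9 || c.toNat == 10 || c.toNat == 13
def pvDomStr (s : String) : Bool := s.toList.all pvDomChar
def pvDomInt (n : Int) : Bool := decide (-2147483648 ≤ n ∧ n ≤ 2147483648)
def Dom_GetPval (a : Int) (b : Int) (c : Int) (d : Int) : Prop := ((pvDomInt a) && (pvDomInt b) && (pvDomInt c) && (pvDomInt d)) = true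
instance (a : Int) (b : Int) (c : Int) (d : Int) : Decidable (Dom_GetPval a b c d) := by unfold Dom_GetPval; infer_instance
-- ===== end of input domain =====

-- B ranks the four codes and judges the two strongest patterns instead of A's 8-bucket histogram cascade.

-- ===== PORT A =====
-- type_[x] += 1  (Python list assignment; negative x addresses from the end)
def pvBump (xs : List Int) (x : Int) : List Int :=
  PySem.List.pySetD xs x (PySem.List.pyGetD xs x 0 + 1)

def GetPval (a : Int) (b : Int) (c : Int) (d : Int) : Int :=
  let t := pvBump (pvBump (pvBump (pvBump (List.replicate 8 (0 : Int)) a) b) c) d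
  if PySem.List.pyGetD t 7 0 > 0 then 5000
  else if PySem.List.pyGetD t 6 0 > 0 ∨ PySem.List.pyGetD t 5 0 > 1 then 1200
  else if PySem.List.pyGetD t 5 0 > 0 ∧ PySem.List.pyGetD t 4 0 > 0 then 1000
  else if PySem.List.pyGetD t 4 0 > 1 then 200
  else
    let val : List Int := [0, 2, 5, 5, 12, 12]
    (PySem.List.pyRange 1 6 1).foldl
      (fun score i => score + PySem.List.pyGetD val i 0 * PySem.List.pyGetD t i 0) 0

-- ===== PORT B =====
-- RANK[x] (tuple indexing; the default is unreachable for the codes Pre_ admits)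
def pvRank (x : Int) : Int :=
  PySem.List.pyGetD [0, 1, 2, 2, 3, 4, 5, 6] x 0

def pvRankWeight : List Int := [0, 2, 5, 12, 12]

def GetPval_alt (a : Int) (b : Int) (c : Int) (d : Int) : Int :=
  let ranks := PySem.List.sorted ([a, b, c, d].map pvRank) (fun x => x) true
  match PySem.List.slice ranks none (some 2) with
  | [hi, second] =>
      if hi = 6 then 5000
      else if hi = 5 ∨ (hi = 4 ∧ second = 4) then 1200
      else if hi = 4 ∧ second = 3 then 1000
      else if hi = 3 ∧ second = 3 then 200
      else (ranks.map (fun r => PySem.List.pyGetD pvRankWeight r 0)).sum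
  | _ => 0  -- unreachable: slicing a 4-element list to 2 always yields two elements

-- ===== PRECONDITION & SPEC =====
-- Pre_ admits exactly the inputs on which the Python A returns: any code outside [-8,7]
-- makes A's 8-element histogram indexing raise IndexError.
def Pre_GetPval (a : Int) (b : Int) (c : Int) (d : Int) : Prop :=
  (-8 ≤ a ∧ a ≤ 7) ∧ (-8 ≤ b ∧ b ≤ 7) ∧ (-8 ≤ c ∧ c ≤ 7) ∧ (-8 ≤ d ∧ d ≤ 7)
instance (a : Int) (b : Int) (c : Int) (d : Int) : Decidable (Pre_GetPval a b c d) := by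
  unfold Pre_GetPval; infer_instance
def pvWitness_GetPval : Int × Int × Int × Int := (5, 4, 1, 0)

def Spec_GetPval (a : Int) (b : Int) (c : Int) (d : Int) (out : Int) : Prop := out = GetPval_alt a b c d
instance (a : Int) (b : Int) (c : Int) (d : Int) (out : Int) : Decidable (Spec_GetPval a b c d out) := by unfold Spec_GetPval; infer_instance

-- ===== CLAIM (what is proved, stated in full; the proofs are below) =====
def Claim_equal_GetPval : Prop := ∀ (a : Int) (b : Int) (c : Int) (d : Int), Dom_GetPval a b c d → Pre_GetPval a b c d → Spec_GetPval a b c d (GetPval a b c d)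

-- ===== LEMMAS AND PROOFS =====

-- Python's index resolution on a length-8 list identifies x and x+8 for -8 ≤ x < 0.
lemma pvIdx_wrap (x : Int) (h1 : -8 ≤ x) (h2 : x < 0) :
    PySem.List.pyIdx? 8 x = PySem.List.pyIdx? 8 (x + 8) := by
  simp only [PySem.List.pyIdx?]
  split_ifs <;> try omega
  simp only [Option.some.injEq]
  omega

lemma pvBump_wrap (xs : List Int) (h8 : xs.length = 8) (x : Int) (h1 : -8 ≤ x) (h2 : x < 0) :
    pvBump xs x = pvBump xs (x + 8) := by
  simp only [pvBump, PySem.List.pySetD, PySem.List.pySet?, PySem.List.pyGetD,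
    PySem.List.pyGet?, h8, pvIdx_wrap x h1 h2]

lemma pvBump_len (xs : List Int) (x : Int) : (pvBump xs x).length = xs.length := by
  simp [pvBump, PySem.List.length_pySetD]

lemma pvRank_wrap (x : Int) (h1 : -8 ≤ x) (h2 : x < 0) : pvRank x = pvRank (x + 8) := by
  simp only [pvRank, PySem.List.pyGetD, PySem.List.pyGet?, List.length_cons, List.length_nil,
    pvIdx_wrap x h1 h2]

-- wrap lemmas for each argument position of A's port
lemma pvWrapA1 (a b c d : Int) (h1 : -8 ≤ a) (h2 : a < 0) :
    GetPval a b c d = GetPval (a + 8) b c d := by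
  simp only [GetPval]
  rw [pvBump_wrap (List.replicate 8 (0 : Int)) (by simp) a h1 h2]

lemma pvWrapA2 (a b c d : Int) (h1 : -8 ≤ b) (h2 : b < 0) :
    GetPval a b c d = GetPval a (b + 8) c d := by
  simp only [GetPval]
  rw [pvBump_wrap _ (by simp [pvBump_len]) b h1 h2]

lemma pvWrapA3 (a b c d : Int) (h1 : -8 ≤ c) (h2 : c < 0) :
    GetPval a b c d = GetPval a b (c + 8) d := by
  simp only [GetPval]
  rw [pvBump_wrap _ (by simp [pvBump_len]) c h1 h2]

lemma pvWrapA4 (a b c d : Int) (h1 : -8 ≤ d) (h2 : d < 0) :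
    GetPval a b c d = GetPval a b c (d + 8) := by
  simp only [GetPval]
  rw [pvBump_wrap _ (by simp [pvBump_len]) d h1 h2]

-- the same wraps on B's port (pvRank resolves indices by the same rule)
lemma pvWrapB1 (a b c d : Int) (h1 : -8 ≤ a) (h2 : a < 0) :
    GetPval_alt a b c d = GetPval_alt (a + 8) b c d := by
  simp only [GetPval_alt, List.map_cons, List.map_nil, pvRank_wrap a h1 h2]
lemma pvWrapB2 (a b c d : Int) (h1 : -8 ≤ b) (h2 : b < 0) :
    GetPval_alt a b c d = GetPval_alt a (b + 8) c d := by
  simp only [GetPval_alt, List.map_cons, List.map_nil, pvRank_wrap b h1 h2]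
lemma pvWrapB3 (a b c d : Int) (h1 : -8 ≤ c) (h2 : c < 0) :
    GetPval_alt a b c d = GetPval_alt a b (c + 8) d := by
  simp only [GetPval_alt, List.map_cons, List.map_nil, pvRank_wrap c h1 h2]
lemma pvWrapB4 (a b c d : Int) (h1 : -8 ≤ d) (h2 : d < 0) :
    GetPval_alt a b c d = GetPval_alt a b c (d + 8) := by
  simp only [GetPval_alt, List.map_cons, List.map_nil, pvRank_wrap d h1 h2]

-- exhaustive check over the 8^4 non-negative code combinations
set_option maxHeartbeats 4000000 in
lemma pvCore : ∀ a b c d : Fin 8,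
    GetPval (a : ℕ) (b : ℕ) (c : ℕ) (d : ℕ) = GetPval_alt (a : ℕ) (b : ℕ) (c : ℕ) (d : ℕ) := by
  decide

lemma pvCoreInt (a b c d : Int) (ha0 : 0 ≤ a) (ha7 : a ≤ 7) (hb0 : 0 ≤ b) (hb7 : b ≤ 7)
    (hc0 : 0 ≤ c) (hc7 : c ≤ 7) (hd0 : 0 ≤ d) (hd7 : d ≤ 7) :
    GetPval a b c d = GetPval_alt a b c d := by
  have h := pvCore ⟨a.toNat, by omega⟩ ⟨b.toNat, by omega⟩ ⟨c.toNat, by omega⟩ ⟨d.toNat, by omega⟩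
  simpa [Int.toNat_of_nonneg, ha0, hb0, hc0, hd0] using h

-- ===== VERDICT (by name: the statement is the Claim_ definition above) =====
theorem GetPval_spec : Claim_equal_GetPval := by
  intro a b c d _ hpre
  unfold Spec_GetPval
  obtain ⟨⟨ha1, ha2⟩, ⟨hb1, hb2⟩, ⟨hc1, hc2⟩, ⟨hd1, hd2⟩⟩ := hpre
  have e1 : GetPval a b c d = GetPval (if a < 0 then a + 8 else a) b c d := by
    split_ifs with h
    · exact pvWrapA1 a b c d ha1 h
    · rfl
  have e2 : ∀ a', GetPval a' b c d = GetPval a' (if b < 0 then b + 8 else b) c d := by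
    intro a'; split_ifs with h
    · exact pvWrapA2 a' b c d hb1 h
    · rfl
  have e3 : ∀ a' b', GetPval a' b' c d = GetPval a' b' (if c < 0 then c + 8 else c) d := by
    intro a' b'; split_ifs with h
    · exact pvWrapA3 a' b' c d hc1 h
    · rfl
  have e4 : ∀ a' b' c', GetPval a' b' c' d = GetPval a' b' c' (if d < 0 then d + 8 else d) := by
    intro a' b' c'; split_ifs with h
    · exact pvWrapA4 a' b' c' d hd1 h
    · rfl
  have f1 : GetPval_alt a b c d = GetPval_alt (if a < 0 then a + 8 else a) b c d := by
    split_ifs with h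
    · exact pvWrapB1 a b c d ha1 h
    · rfl
  have f2 : ∀ a', GetPval_alt a' b c d = GetPval_alt a' (if b < 0 then b + 8 else b) c d := by
    intro a'; split_ifs with h
    · exact pvWrapB2 a' b c d hb1 h
    · rfl
  have f3 : ∀ a' b', GetPval_alt a' b' c d = GetPval_alt a' b' (if c < 0 then c + 8 else c) d := by
    intro a' b'; split_ifs with h
    · exact pvWrapB3 a' b' c d hc1 h
    · rfl
  have f4 : ∀ a' b' c', GetPval_alt a' b' c' d = GetPval_alt a' b' c' (if d < 0 then d + 8 else d) := by
    intro a' b' c'; split_ifs with h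
    · exact pvWrapB4 a' b' c' d hd1 h
    · rfl
  rw [e1, e2, e3, e4, f1, f2, f3, f4]
  exact pvCoreInt _ _ _ _ (by split_ifs <;> omega) (by split_ifs <;> omega)
    (by split_ifs <;> omega) (by split_ifs <;> omega) (by split_ifs <;> omega)
    (by split_ifs <;> omega) (by split_ifs <;> omega) (by split_ifs <;> omega)
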